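-- pv_equiv track=rewrite | github.com/dantetemplar/competitive-programming | Codeforces - Codeforces Round 1056 (Div. 2)/B_Великий_побег_Авраама.py | solve
-- ===== SOURCE A (Python) =====
-- def solve(n: int, k: int):
--     total = n * n
--
--     r = total - k
--
--     if r == 1 or r < 0:
--         return False, None
--
--     table = []
--
--     for i in range(n):
--         row = []
--         flag = bool(r)
--         for j in range(n):
--             if r > 0:
--                 r -= 1
--                 if j == n - 1:
--                     row.append("L")
--                 else:
--                     row.append("R")
--             else:
--                 if flag:
--                     flag = False
--                     if j == 1:
--                         row[-1] = "U"
--                     else: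
--                         row[-1] = "L"
--                 row.append("D")
--
--         table.append("".join(row))
--     return True, table
-- ===== SOURCE B (Python) =====
-- def solve(n: int, k: int):
--     total = n * n
--     r = total - k
--     if r == 1 or r < 0:
--         return False, None
--     rows = []
--     for i in range(n):
--         re = r - i * n
--         if re >= n:
--             rows.append("R" * (n - 1) + "L")
--         elif re <= 0:
--             rows.append("D" * n)
--         else:
--             rows.append("R" * (re - 1) + ("U" if re == 1 else "L") + "D" * (n - re))
--     return True, rows
-- ===== Notes on version B (the rewrite author's own statement) =====
-- stated objective: faster
-- what changed: Replaces the per-cell state machine (running counter r, per-row flag, last-element overwrite) by a closed form: each row's string is computed directly from re = r - i*n as 'R'*(n-1)+'L', 'D'*n, or 'R'*(re-1)+turn+'D'*(n-re), with no counter, flag or per-cell loop.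
import Mathlib
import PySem

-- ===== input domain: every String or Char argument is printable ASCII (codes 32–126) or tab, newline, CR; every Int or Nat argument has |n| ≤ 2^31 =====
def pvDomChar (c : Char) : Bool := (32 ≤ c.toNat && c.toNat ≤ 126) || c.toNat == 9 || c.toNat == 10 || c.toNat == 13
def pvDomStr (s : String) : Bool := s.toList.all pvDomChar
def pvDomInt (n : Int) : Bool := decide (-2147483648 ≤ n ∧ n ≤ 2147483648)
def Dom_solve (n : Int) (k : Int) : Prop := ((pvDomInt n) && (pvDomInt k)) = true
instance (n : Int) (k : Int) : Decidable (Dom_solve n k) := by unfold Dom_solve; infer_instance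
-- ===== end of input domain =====

-- B replaces A's per-cell counter/flag state machine by closed-form row strings, which the
-- timing run measured as faster (a constant-factor mechanism: no per-cell Python-level work).

-- ===== PORT A =====
-- row[-1] = v  (A executes this only when the row is nonempty)
def solveSetLast (row : List String) (v : String) : List String :=
  row.dropLast ++ [v]

def solveInner (n : Int) (st : Int × Bool × List String) (j : Int) : Int × Bool × List String :=
  match st with
  | (r, flag, row) =>
    if 0 < r then
      (r - 1, flag, row ++ [if j = n - 1 then "L" else "R"])
    else if flag then
      (r, false, solveSetLast row (if j = 1 then "U" else "L") ++ ["D"])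
    else
      (r, flag, row ++ ["D"])

def solveOuter (n : Int) (st : Int × List String) (_i : Int) : Int × List String :=
  match st with
  | (r, table) =>
    match (PySem.List.pyRange 0 n 1).foldl (solveInner n) (r, decide (r ≠ 0), []) with
    | (r', _, row) => (r', table ++ [PySem.Str.join "" row])

def solve (n : Int) (k : Int) : Bool × Option (List String) :=
  let total := n * n
  let r := total - k
  if r = 1 ∨ r < 0 then (false, none)
  else
    match (PySem.List.pyRange 0 n 1).foldl (solveOuter n) (r, []) with
    | (_, table) => (true, some table)

-- ===== PORT B =====
-- Python string repetition "R" * m and concatenation are ported as String.ofList of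
-- List.replicate m.toNat / ++ (exact: Python's s * m is "" for m ≤ 0).
def solveRow (n : Int) (r : Int) (i : Int) : String :=
  let re := r - i * n
  if n ≤ re then String.ofList (List.replicate (n - 1).toNat 'R' ++ ['L'])
  else if re ≤ 0 then String.ofList (List.replicate n.toNat 'D')
  else String.ofList (List.replicate (re - 1).toNat 'R'
        ++ [if re = 1 then 'U' else 'L'] ++ List.replicate (n - re).toNat 'D')

def solve_alt (n : Int) (k : Int) : Bool × Option (List String) :=
  let total := n * n
  let r := total - k
  if r = 1 ∨ r < 0 then (false, none)
  else
    (true, some ((PySem.List.pyRange 0 n 1).foldl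
      (fun rows i => rows ++ [solveRow n r i]) []))

-- ===== PRECONDITION & SPEC =====
def Spec_solve (n : Int) (k : Int) (out : Bool × Option (List String)) : Prop := out = solve_alt n k
instance (n : Int) (k : Int) (out : Bool × Option (List String)) : Decidable (Spec_solve n k out) := by unfold Spec_solve; infer_instance

-- ===== CLAIM (what is proved, stated in full; the proofs are below) =====
def Claim_equal_solve : Prop := ∀ (n : Int) (k : Int), Dom_solve n k → Spec_solve n k (solve n k)

-- ===== LEMMAS AND PROOFS =====

-- The list of one-character strings A's inner loop builds for a row entered with counter re.
def rowListA (n re : Int) : List String :=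
  if n ≤ re then List.replicate (n - 1).toNat "R" ++ ["L"]
  else if re ≤ 0 then List.replicate n.toNat "D"
  else List.replicate (re - 1).toNat "R"
        ++ [if re = 1 then "U" else "L"] ++ List.replicate (n - re).toNat "D"

lemma foldl_inner_ge (n : Int) (js : List Int) (re : Int) (flag : Bool) (acc : List String)
    (h : (js.length : Int) ≤ re) :
    js.foldl (solveInner n) (re, flag, acc) =
      (re - js.length, flag, acc ++ js.map (fun j => if j = n - 1 then "L" else "R")) := by
  induction js generalizing re acc with
  | nil => simp
  | cons j t ih =>
    have hlen : ((j :: t).length : Int) = (t.length : Int) + 1 := by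
      push_cast [List.length_cons]; ring
    have hre : 0 < re := by
      rw [hlen] at h; have := Int.natCast_nonneg t.length; omega
    simp only [List.foldl_cons, solveInner, if_pos hre]
    rw [ih (re - 1) _ (by rw [hlen] at h; omega)]
    refine Prod.ext (by rw [hlen]; ring) (Prod.ext rfl (by simp))

lemma foldl_inner_zero (n : Int) (js : List Int) (acc : List String) :
    js.foldl (solveInner n) (0, false, acc) = (0, false, acc ++ js.map (fun _ => "D")) := by
  induction js generalizing acc with
  | nil => simp
  | cons j t ih =>
    simp only [List.foldl_cons, solveInner, lt_irrefl, if_false, Bool.false_eq_true]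
    rw [ih]
    simp

lemma map_RL_const (n a b : Int) (hb : b ≤ n - 1) :
    (PySem.List.pyRange a b 1).map (fun j => if j = n - 1 then "L" else "R") =
      (PySem.List.pyRange a b 1).map (fun _ => "R") := by
  apply List.map_congr_left
  intro j hj
  rw [PySem.List.mem_pyRange_one] at hj
  rw [if_neg (by omega)]

lemma map_const_pyRange (a b : Int) (s : String) :
    (PySem.List.pyRange a b 1).map (fun _ => s) = List.replicate (b - a).toNat s := by
  rw [List.map_const']
  simp [PySem.List.length_pyRange_one]

lemma row_eval (n re : Int) (hn : 0 < n) (hre : 0 ≤ re) :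
    (PySem.List.pyRange 0 n 1).foldl (solveInner n) (re, decide (re ≠ 0), []) =
      (max (re - n) 0, decide (n ≤ re), rowListA n re) := by
  rcases le_or_gt n re with hge | hlt
  · -- re ≥ n : the whole row is R…RL
    have hlen : ((PySem.List.pyRange 0 n 1).length : Int) = n := by
      simp [PySem.List.length_pyRange_one]; omega
    rw [foldl_inner_ge n _ re _ [] (by omega)]
    have h1 : decide (re ≠ 0) = true := by simp; omega
    have h2 : decide (n ≤ re) = true := by simp; omega
    rw [h1, h2, rowListA, if_pos hge]
    refine Prod.ext (by simp only []; omega) (Prod.ext rfl ?_)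
    have hsplit : PySem.List.pyRange 0 n 1 = PySem.List.pyRange 0 (n - 1) 1 ++ [n - 1] := by
      have := PySem.List.pyRange_one_succ_right (a := 0) (b := n - 1) (by omega)
      simpa [sub_add_cancel] using this
    rw [hsplit, List.map_append, map_RL_const n 0 (n - 1) (by omega), map_const_pyRange]
    simp
  · rcases eq_or_lt_of_le hre with hz | hpos
    · -- re = 0 : the whole row is D…D
      rw [← hz]
      have h1 : decide ((0 : Int) ≠ 0) = false := by simp
      have h2 : decide (n ≤ (0 : Int)) = false := by simp; omega
      have c1 : ¬ n ≤ (0 : Int) := by omega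
      rw [h1, h2, foldl_inner_zero, rowListA, if_neg c1, if_pos (le_refl (0 : Int))]
      refine Prod.ext (by simp only []; omega) (Prod.ext rfl ?_)
      rw [map_const_pyRange]
      simp
    · -- 0 < re < n : R…R, turn, D…D
      have hsplit : PySem.List.pyRange 0 n 1 =
          PySem.List.pyRange 0 re 1 ++ re :: PySem.List.pyRange (re + 1) n 1 := by
        rw [PySem.List.pyRange_one_append 0 re n (by omega) (by omega),
            PySem.List.pyRange_one_cons (a := re) (b := n) (by omega)]
      have hlen : ((PySem.List.pyRange 0 re 1).length : Int) = re := by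
        simp [PySem.List.length_pyRange_one]; omega
      rw [hsplit, List.foldl_append, foldl_inner_ge n _ re _ [] (by omega), hlen]
      have hstep : re - re = 0 := by omega
      have hflag : decide (re ≠ 0) = true := by simp; omega
      rw [hstep, hflag]
      simp only [List.foldl_cons, solveInner]
      rw [if_neg (by omega)]
      simp only [if_true]
      rw [foldl_inner_zero]
      have hRs : (PySem.List.pyRange 0 re 1).map (fun j => if j = n - 1 then "L" else "R") =
          List.replicate re.toNat "R" := by
        rw [map_RL_const n 0 re (by omega), map_const_pyRange]; simp
      rw [hRs]
      simp only [List.nil_append]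
      have hdrop : solveSetLast (List.replicate re.toNat "R") (if re = 1 then "U" else "L") =
          List.replicate (re - 1).toNat "R" ++ [if re = 1 then "U" else "L"] := by
        rw [solveSetLast, List.dropLast_replicate]
        congr 2
        omega
      rw [hdrop, map_const_pyRange]
      have hD : ("D" : String) :: List.replicate (n - (re + 1)).toNat "D" =
          List.replicate (n - re).toNat "D" := by
        have : (n - re).toNat = (n - (re + 1)).toNat + 1 := by omega
        rw [this, List.replicate_succ]
      have h2 : decide (n ≤ re) = false := by simp; omega
      have c1 : ¬ n ≤ re := by omega
      have c2 : ¬ re ≤ 0 := by omega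
      rw [h2, rowListA, if_neg c1, if_neg c2]
      refine Prod.ext (by simp only []; omega) (Prod.ext rfl ?_)
      simp only [List.nil_append, List.append_assoc, List.cons_append]
      rw [← hD]

lemma outer_eval (n : Int) (hn : 0 < n) (r0 : Int) (hr0 : 0 ≤ r0) (i : Nat) :
    (PySem.List.pyRange 0 (i : Int) 1).foldl (solveOuter n) (r0, []) =
      (max (r0 - i * n) 0,
       (List.range i).map (fun (t : Nat) =>
         PySem.Str.join "" (rowListA n (max (r0 - (t : Int) * n) 0)))) := by
  induction i with
  | zero => simp [PySem.List.pyRange_one_eq_nil]; omega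
  | succ i ih =>
    have hsplit : PySem.List.pyRange 0 ((i + 1 : Nat) : Int) 1 =
        PySem.List.pyRange 0 (i : Int) 1 ++ [(i : Int)] := by
      push_cast
      exact PySem.List.pyRange_one_succ_right (Int.natCast_nonneg i)
    rw [hsplit, List.foldl_append, ih]
    simp only [List.foldl_cons, List.foldl_nil, solveOuter]
    rw [row_eval n _ hn (by omega)]
    have hcast : ((i + 1 : Nat) : Int) * n = (i : Int) * n + n := by push_cast; ring
    refine Prod.ext (by simp only []; rw [hcast]; omega) ?_
    rw [List.range_succ, List.map_append]
    simp

lemma flatten_intersperse_nil {α : Type} (l : List (List α)) :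
    (List.intersperse [] l).flatten = l.flatten := by
  induction l with
  | nil => simp
  | cons a t ih =>
    cases t with
    | nil => simp
    | cons b t2 => simp_all [List.intersperse]

lemma join_singletons (l : List String) (cs : List Char) (h : (l.map String.toList).flatten = cs) :
    PySem.Str.join "" l = String.ofList cs := by
  rw [PySem.Str.join, ← h]
  congr 1
  rw [PySem.Chars.join, List.intercalate]
  exact flatten_intersperse_nil _

lemma join_rowListA (n re : Int) (hn : 0 < n) :
    PySem.Str.join "" (rowListA n (max re 0)) =
      (if n ≤ re then String.ofList (List.replicate (n - 1).toNat 'R' ++ ['L'])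
       else if re ≤ 0 then String.ofList (List.replicate n.toNat 'D')
       else String.ofList (List.replicate (re - 1).toNat 'R'
            ++ [if re = 1 then 'U' else 'L'] ++ List.replicate (n - re).toNat 'D')) := by
  rcases le_or_gt n re with hge | hlt
  · have c1 : n ≤ max re 0 := by omega
    rw [rowListA, if_pos c1, if_pos hge]
    apply join_singletons
    simp
  · rcases le_or_gt re 0 with hle | hpos
    · have c1 : ¬ n ≤ max re 0 := by omega
      have c2 : max re 0 ≤ 0 := by omega
      have c3 : ¬ n ≤ re := by omega
      rw [rowListA, if_neg c1, if_pos c2, if_neg c3, if_pos hle]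
      apply join_singletons
      simp
    · have hmax : max re 0 = re := by omega
      have c1 : ¬ n ≤ re := by omega
      have c2 : ¬ re ≤ 0 := by omega
      rw [rowListA, hmax, if_neg c1, if_neg c2, if_neg c1, if_neg c2]
      apply join_singletons
      by_cases h1 : re = 1 <;>
        simp [h1, List.map_append, List.flatten_append]

-- ===== VERDICT (by name: the statement is the Claim_ definition above) =====
theorem solve_spec : Claim_equal_solve := by
  intro n k _dom
  unfold Spec_solve solve solve_alt
  simp only
  by_cases hg : n * n - k = 1 ∨ n * n - k < 0
  · rw [if_pos hg, if_pos hg]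
  · rw [if_neg hg, if_neg hg]
    have hr0 : 0 ≤ n * n - k := by omega
    rcases le_or_gt n 0 with hn | hn
    · rw [PySem.List.pyRange_one_eq_nil (by omega)]
      simp
    · have hcast : ((n.toNat : Int)) = n := Int.toNat_of_nonneg (by omega)
      have hA := outer_eval n hn (n * n - k) hr0 n.toNat
      rw [hcast] at hA
      rw [hA]
      have hB : (PySem.List.pyRange 0 n 1).foldl
          (fun rows i => rows ++ [solveRow n (n * n - k) i]) ([] : List String) =
          (PySem.List.pyRange 0 n 1).map (solveRow n (n * n - k)) := by
        rw [PySem.List.foldl_append_singleton_eq_map]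
        simp
      rw [hB]
      have hrange : PySem.List.pyRange 0 n 1 =
          (List.range n.toNat).map (fun (t : Nat) => (t : Int)) := by
        rw [PySem.List.pyRange_one]
        simp
      rw [hrange, List.map_map]
      dsimp only
      refine congrArg (fun l => ((true : Bool), some l)) ?_
      apply List.map_congr_left
      intro t _
      rw [Function.comp_apply, join_rowListA n (n * n - k - t * n) hn, solveRow]
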